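-- pv_equiv track=rewrite | github.com/rjmitchell/clear-notation | clearnotation_reference/utils.py | split_table_row
-- ===== SOURCE A (Python) =====
-- def split_table_row(line: str) -> list[str]:
--     """Split a pipe-delimited table row into cell strings.
--
--     Handles ``\\|`` and ``\\\\`` escapes. Unknown escape sequences
--     are kept as-is (backslash preserved).
--     """
--     cells: list[str] = []
--     current: list[str] = []
--     index = 0
--     while index < len(line):
--         ch = line[index]
--         if ch == "\\":
--             index += 1
--             if index < len(line) and line[index] in {"|", "\\"}:
--                 current.append(line[index])
--                 index += 1
--                 continue
--             current.append("\\")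
--             continue
--         if ch == "|":
--             cells.append("".join(current).strip())
--             current.clear()
--             index += 1
--             continue
--         current.append(ch)
--         index += 1
--     cells.append("".join(current).strip())
--     return cells
-- ===== SOURCE B (Python) =====
-- import re
--
-- _TOKEN = re.compile(r'\\[|\\]|\||[\s\S]')
--
-- def split_table_row(line: str) -> list[str]:
--     """Tokenize with a regex (escape pairs, bare pipes, any single char),
--     then fold the tokens into cells."""
--     cells: list[str] = []
--     current: list[str] = []
--     for tok in _TOKEN.findall(line):
--         if tok == '|':
--             cells.append(''.join(current).strip())
--             current = []
--         elif len(tok) == 2: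
--             current.append(tok[1])
--         else:
--             current.append(tok)
--     cells.append(''.join(current).strip())
--     return cells
-- ===== Notes on version B (the rewrite author's own statement) =====
-- stated objective: alternative
-- what changed: Replaced A's single index-walking while-loop (manual lookahead with index arithmetic) by a two-phase design: a regex tokenizer (escape pair, bare pipe, or any single char) followed by a fold over the token stream that closes the current cell at each pipe token.
import Mathlib
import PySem

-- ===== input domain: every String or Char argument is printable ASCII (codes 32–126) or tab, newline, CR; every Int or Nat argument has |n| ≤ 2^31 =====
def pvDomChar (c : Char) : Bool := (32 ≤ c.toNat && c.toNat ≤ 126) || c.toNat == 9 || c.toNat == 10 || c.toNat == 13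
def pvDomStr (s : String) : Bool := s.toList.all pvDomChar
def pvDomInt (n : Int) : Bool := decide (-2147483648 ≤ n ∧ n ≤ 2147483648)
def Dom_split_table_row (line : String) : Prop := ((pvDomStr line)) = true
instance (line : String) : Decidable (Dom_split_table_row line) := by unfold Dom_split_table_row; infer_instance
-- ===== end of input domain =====

-- B re-decomposes A's single index-walking loop into a tokenize phase (regex-style
-- alternation over escape pairs / pipes / single chars) and a fold over the tokens;
-- objective: alternative decomposition, same cost.

-- ===== PORT A =====
-- the while-loop of A: state (current, cells); the unknown-escape branch re-enters
-- the loop with only 'index' advanced past the backslash.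
def pvALoop : List Char → List Char → List String → List String
  | [], cur, cells => cells ++ [String.mk (PySem.Chars.strip cur)]
  | '\\' :: rest, cur, cells =>
      match rest with
      | c :: rest' =>
          if c = '|' ∨ c = '\\' then pvALoop rest' (cur ++ [c]) cells
          else pvALoop (c :: rest') (cur ++ ['\\']) cells  -- rest = c :: rest' here
      | [] => pvALoop [] (cur ++ ['\\']) cells
  | '|' :: rest, cur, cells =>
      pvALoop rest [] (cells ++ [String.mk (PySem.Chars.strip cur)])
  | c :: rest, cur, cells => pvALoop rest (cur ++ [c]) cells
termination_by l _ _ => l.length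
decreasing_by all_goals (simp_all; try omega)

def split_table_row (line : String) : List String :=
  pvALoop line.toList [] []

-- ===== PORT B =====
-- tokenizer = the regex alternation \\[|\\] | \| | [\s\S], leftmost-first
def pvTokenize : List Char → List (List Char)
  | [] => []
  | '\\' :: c :: rest =>
      if c = '|' ∨ c = '\\' then ['\\', c] :: pvTokenize rest
      else ['\\'] :: pvTokenize (c :: rest)
  | c :: rest => [c] :: pvTokenize rest
termination_by l => l.length
decreasing_by all_goals simp

def pvBStep : (List String × List Char) → List Char → (List String × List Char)
  | (cells, cur), tok =>
      if tok = ['|'] then (cells ++ [String.mk (PySem.Chars.strip cur)], [])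
      else match tok with
        | [_, c] => (cells, cur ++ [c])
        | _ => (cells, cur ++ tok)

def split_table_row_alt (line : String) : List String :=
  let p := (pvTokenize line.toList).foldl pvBStep ([], [])
  p.1 ++ [String.mk (PySem.Chars.strip p.2)]

-- ===== PRECONDITION & SPEC =====
def Spec_split_table_row (line : String) (out : List String) : Prop := out = split_table_row_alt line
instance (line : String) (out : List String) : Decidable (Spec_split_table_row line out) := by unfold Spec_split_table_row; infer_instance

-- ===== CLAIM (what is proved, stated in full; the proofs are below) =====
def Claim_equal_split_table_row : Prop := ∀ (line : String), Dom_split_table_row line → Spec_split_table_row line (split_table_row line)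

-- ===== LEMMAS AND PROOFS =====

-- A's loop equals B's tokenize-then-fold from any intermediate state
theorem pvALoop_eq_fold : ∀ (n : Nat) (l cur : List Char) (cells : List String),
    l.length ≤ n →
    pvALoop l cur cells =
      (let p := (pvTokenize l).foldl pvBStep (cells, cur)
       p.1 ++ [String.mk (PySem.Chars.strip p.2)]) := by
  intro n
  induction n with
  | zero =>
      intro l cur cells h
      have : l = [] := List.eq_nil_of_length_eq_zero (Nat.le_zero.mp h)
      subst this
      simp [pvALoop, pvTokenize]
  | succ n ih =>
      intro l cur cells h
      rcases l with _ | ⟨hd, tl⟩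
      · simp [pvALoop, pvTokenize]
      · by_cases hbs : hd = '\\'
        · subst hbs
          rcases tl with _ | ⟨c, rest'⟩
          · simp [pvALoop, pvTokenize, pvBStep, List.foldl]
          · by_cases hc : c = '|' ∨ c = '\\'
            · have hA : pvALoop ('\\' :: c :: rest') cur cells
                  = pvALoop rest' (cur ++ [c]) cells := by
                rw [pvALoop]; simp [hc]
              have hT : pvTokenize ('\\' :: c :: rest')
                  = ['\\', c] :: pvTokenize rest' := by
                rw [pvTokenize]; simp [hc]
              have hb : pvBStep (cells, cur) ['\\', c] = (cells, cur ++ [c]) := by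
                simp [pvBStep]
              rw [hA, hT]
              simp only [List.foldl, hb]
              exact ih rest' (cur ++ [c]) cells (by simp at h ⊢; omega)
            · have hA : pvALoop ('\\' :: c :: rest') cur cells
                  = pvALoop (c :: rest') (cur ++ ['\\']) cells := by
                rw [pvALoop]; simp [hc]
              have hT : pvTokenize ('\\' :: c :: rest')
                  = ['\\'] :: pvTokenize (c :: rest') := by
                rw [pvTokenize]; simp [hc]
              have hb : pvBStep (cells, cur) ['\\'] = (cells, cur ++ ['\\']) := by
                simp [pvBStep]
              rw [hA, hT]
              simp only [List.foldl, hb]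
              exact ih (c :: rest') (cur ++ ['\\']) cells (by simp at h ⊢; omega)
        · by_cases hp : hd = '|'
          · subst hp
            have hA : pvALoop ('|' :: tl) cur cells
                = pvALoop tl [] (cells ++ [String.mk (PySem.Chars.strip cur)]) := by
              rw [pvALoop] <;> simp
            have hT : pvTokenize ('|' :: tl) = ['|'] :: pvTokenize tl := by
              rw [pvTokenize] <;> simp
            have hb : pvBStep (cells, cur) ['|']
                = (cells ++ [String.mk (PySem.Chars.strip cur)], []) := by
              simp [pvBStep]
            rw [hA, hT]
            simp only [List.foldl, hb]
            exact ih tl [] _ (by simp at h ⊢; omega)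
          · have hA : pvALoop (hd :: tl) cur cells = pvALoop tl (cur ++ [hd]) cells := by
              rw [pvALoop]
              all_goals (intros; first | exact hbs ‹hd = '\\'› | exact hp ‹hd = '|'›)
            have hT : pvTokenize (hd :: tl) = [hd] :: pvTokenize tl := by
              rw [pvTokenize] <;> simp_all
            have hb : pvBStep (cells, cur) [hd] = (cells, cur ++ [hd]) := by
              simp [pvBStep, hp]
            rw [hA, hT]
            simp only [List.foldl, hb]
            exact ih tl (cur ++ [hd]) cells (by simp at h ⊢; omega)

-- ===== VERDICT (by name: the statement is the Claim_ definition above) =====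
theorem split_table_row_spec : Claim_equal_split_table_row := by
  intro line _
  unfold Spec_split_table_row split_table_row split_table_row_alt
  exact pvALoop_eq_fold line.toList.length line.toList [] [] le_rfl
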